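-- pv_equiv track=rewrite | github.com/Lakshmeesh703/Samyuti-2026 | backend/app/chant.py | build_pattern
-- ===== SOURCE A (Python) =====
-- from typing import Iterable
--
-- def build_pattern(types: Iterable[str], pada_breaks: list[int] | None = None) -> str:
--     letters = ["G" if t == "guru" else "L" for t in types]
--     if not pada_breaks:
--         return "".join(letters)
--
--     out: list[str] = []
--     for idx, ch in enumerate(letters, start=1):
--         out.append(ch)
--         if idx in set(pada_breaks):
--             out.append("|")
--     return "".join(out).rstrip("|")
-- ===== SOURCE B (Python) =====
-- def build_pattern(types, pada_breaks=None):
--     letters = "".join("G" if t == "guru" else "L" for t in types)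
--     if not pada_breaks:
--         return letters
--     # cut positions that actually split the string: in range, deduplicated, ascending
--     cuts = sorted({p for p in pada_breaks if 1 <= p < len(letters)})
--     segs = []
--     prev = 0
--     for c in cuts:
--         segs.append(letters[prev:c])
--         prev = c
--     segs.append(letters[prev:])
--     return "|".join(segs)
-- ===== Notes on version B (the rewrite author's own statement) =====
-- stated objective: alternative
-- what changed: A walks the letters appending a '|' after every flagged 1-based position (rebuilding set(pada_breaks) on each letter) and rstrips a trailing '|'; B instead computes the sorted in-range cut positions once, slices the letter string into consecutive segments at those cuts and joins the segments with '|', so no trailing separator ever appears.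
import Mathlib
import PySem

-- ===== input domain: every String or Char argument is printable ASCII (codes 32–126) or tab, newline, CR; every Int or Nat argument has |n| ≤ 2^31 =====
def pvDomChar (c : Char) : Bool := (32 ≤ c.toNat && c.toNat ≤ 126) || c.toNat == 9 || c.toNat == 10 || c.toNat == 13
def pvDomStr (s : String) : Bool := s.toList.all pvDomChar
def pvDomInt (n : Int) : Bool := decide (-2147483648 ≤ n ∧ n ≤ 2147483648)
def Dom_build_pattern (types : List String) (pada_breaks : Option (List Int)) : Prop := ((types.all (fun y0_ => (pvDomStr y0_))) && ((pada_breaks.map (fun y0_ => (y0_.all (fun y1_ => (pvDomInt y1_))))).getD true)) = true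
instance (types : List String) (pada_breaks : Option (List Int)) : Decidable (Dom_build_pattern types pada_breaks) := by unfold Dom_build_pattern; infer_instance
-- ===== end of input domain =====

-- B replaces A's per-letter loop (which appends "|" after flagged positions and rstrips a
-- trailing "|") by computing the sorted in-range cut positions once and joining the slices
-- between them with "|" — objective: alternative decomposition, no trailing separator to strip.

-- ===== PORT A =====
-- helper for Python's `.rstrip("|")`: drop the trailing characters that are '|' (exact)
def pvRstripPipes (l : List Char) : List Char :=
  (l.reverse.dropWhile (fun c => c == '|')).reverse

def build_pattern (types : List String) (pada_breaks : Option (List Int)) : String :=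
  let letters := types.map (fun t => if t == "guru" then "G" else "L")
  let noBreaks := match pada_breaks with
    | none => true
    | some l => l.isEmpty
  if noBreaks then
    PySem.Str.join "" letters
  else
    let pb := pada_breaks.getD []
    let out := (letters.foldl (fun (st : List String × Int) ch =>
      let out1 := st.1 ++ [ch]
      let out2 := if (PySem.Set.ofList pb).contains st.2 then out1 ++ ["|"] else out1
      (out2, st.2 + 1)) ([], 1)).1
    String.ofList (pvRstripPipes (PySem.Str.join "" out).toList)

-- ===== PORT B =====
def build_pattern_alt (types : List String) (pada_breaks : Option (List Int)) : String :=
  let letters := PySem.Str.join "" (types.map (fun t => if t == "guru" then "G" else "L"))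
  let noBreaks := match pada_breaks with
    | none => true
    | some l => l.isEmpty
  if noBreaks then
    letters
  else
    let n : Int := (letters.toList.length : Int)
    let cuts := PySem.List.sorted
      (PySem.Set.ofList ((pada_breaks.getD []).filter (fun p => 1 ≤ p && p < n)))
      (fun x => x) false
    let st := cuts.foldl (fun (st : List String × Int) c =>
      (st.1 ++ [String.ofList (PySem.List.slice letters.toList (some st.2) (some c))], c)) ([], 0)
    let segs := st.1 ++ [String.ofList (PySem.List.slice letters.toList (some st.2) none)]
    PySem.Str.join "|" segs

-- ===== PRECONDITION & SPEC =====
def Spec_build_pattern (types : List String) (pada_breaks : Option (List Int)) (out : String) : Prop := out = build_pattern_alt types pada_breaks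
instance (types : List String) (pada_breaks : Option (List Int)) (out : String) : Decidable (Spec_build_pattern types pada_breaks out) := by unfold Spec_build_pattern; infer_instance

-- ===== CLAIM (what is proved, stated in full; the proofs are below) =====
def Claim_equal_build_pattern : Prop := ∀ (types : List String) (pada_breaks : Option (List Int)), Dom_build_pattern types pada_breaks → Spec_build_pattern types pada_breaks (build_pattern types pada_breaks)

-- ===== LEMMAS AND PROOFS =====

-- letters with a pipe after every 1-based position i with P i (A before the rstrip)
def pvWv (P : Int → Bool) : List Char → Int → List Char
  | [], _ => []
  | c :: rest, i => c :: ((if P i then ['|'] else []) ++ pvWv P rest (i + 1))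

-- same, but never a pipe after the LAST letter (the common normal form)
def pvWvc (P : Int → Bool) : List Char → Int → List Char
  | [], _ => []
  | [c], _ => [c]
  | c :: d :: rest, i => c :: ((if P i then ['|'] else []) ++ pvWvc P (d :: rest) (i + 1))

-- B's segments, recursively
def pvBsegs (ls : List Char) (prev : Int) : List Int → List (List Char)
  | [] => [PySem.List.slice ls (some prev) none]
  | c :: cs => PySem.List.slice ls (some prev) (some c) :: pvBsegs ls c cs

-- A's per-letter loop, written recursively
def pvAweave (P : Int → Bool) : List String → Int → List String
  | [], _ => []
  | ch :: rest, i => (ch :: (if P i then ["|"] else [])) ++ pvAweave P rest (i + 1)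

theorem pv_afold (P : Int → Bool) (l : List String) (acc : List String) (i : Int) :
    (l.foldl (fun (st : List String × Int) ch =>
      ((if P st.2 then (st.1 ++ [ch]) ++ ["|"] else st.1 ++ [ch]), st.2 + 1)) (acc, i)).1
    = acc ++ pvAweave P l i := by
  induction l generalizing acc i with
  | nil => simp [pvAweave]
  | cons ch rest ih =>
    simp only [List.foldl_cons, pvAweave]
    rw [ih]
    by_cases h : P i <;> simp [h]

theorem pv_join_nil_flatten (ps : List (List Char)) :
    PySem.Chars.join [] ps = ps.flatten := by
  induction ps with
  | nil => simp [PySem.Chars.join_nil]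
  | cons p rest ih =>
    cases rest with
    | nil => simp [PySem.Chars.join_singleton]
    | cons q rest' =>
      rw [PySem.Chars.join_cons_cons]
      simp only [List.flatten_cons] at *
      simp [ih]

theorem pv_aweave_flatten (P : Int → Bool) (lc : List Char) (i : Int) :
    ((pvAweave P (lc.map (fun c => String.ofList [c])) i).map String.toList).flatten
    = pvWv P lc i := by
  induction lc generalizing i with
  | nil => simp [pvAweave, pvWv]
  | cons c rest ih =>
    simp only [List.map_cons, pvAweave, pvWv]
    by_cases h : P i <;> simp [h, ih]

theorem pv_rstrip_cons_of_not_pipe (c : Char) (l : List Char) (h : (c == '|') = false) :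
    pvRstripPipes (c :: l) = c :: pvRstripPipes l := by
  unfold pvRstripPipes
  rw [List.reverse_cons, List.dropWhile_append]
  by_cases he : (List.dropWhile (fun c => c == '|') l.reverse).isEmpty = true
  · rw [if_pos he, List.isEmpty_iff.mp he]
    simp [List.dropWhile, h]
  · rw [if_neg he]
    simp

theorem pv_rstrip_cons_of_ne_nil (c : Char) (l : List Char) (h : pvRstripPipes l ≠ []) :
    pvRstripPipes (c :: l) = c :: pvRstripPipes l := by
  unfold pvRstripPipes at *
  rw [List.reverse_cons, List.dropWhile_append]
  by_cases he : (List.dropWhile (fun c => c == '|') l.reverse).isEmpty = true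
  · exfalso; apply h; rw [List.isEmpty_iff.mp he]; rfl
  · rw [if_neg he]
    simp

theorem pv_wvc_ne_nil (P : Int → Bool) (c : Char) (l : List Char) (i : Int) :
    pvWvc P (c :: l) i ≠ [] := by
  cases l <;> simp [pvWvc]

theorem pv_rstrip_wv (P : Int → Bool) (ls : List Char) (i : Int)
    (hch : ∀ c ∈ ls, (c == '|') = false) :
    pvRstripPipes (pvWv P ls i) = pvWvc P ls i := by
  induction ls generalizing i with
  | nil => rfl
  | cons c rest ih =>
    have hc : (c == '|') = false := hch c (by simp)
    cases rest with
    | nil =>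
      by_cases h : P i
      · simp only [pvWv, pvWvc, h, if_pos]
        rw [pv_rstrip_cons_of_not_pipe c _ hc]
        rfl
      · simp only [pvWv, pvWvc]
        rw [if_neg (by simp [h])]
        rw [List.nil_append, pv_rstrip_cons_of_not_pipe c _ hc]
        rfl
    | cons d rest' =>
      have hrest : ∀ x ∈ d :: rest', (x == '|') = false :=
        fun x hx => hch x (List.mem_cons_of_mem _ hx)
      have ihr := ih (i + 1) hrest
      have hne : pvRstripPipes (pvWv P (d :: rest') (i + 1)) ≠ [] := by
        rw [ihr]; exact pv_wvc_ne_nil _ _ _ _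
      rw [show pvWv P (c :: d :: rest') i
            = c :: ((if P i then ['|'] else []) ++ pvWv P (d :: rest') (i + 1)) from rfl,
          show pvWvc P (c :: d :: rest') i
            = c :: ((if P i then ['|'] else []) ++ pvWvc P (d :: rest') (i + 1)) from rfl]
      by_cases h : P i
      · rw [if_pos h]
        simp only [List.cons_append, List.nil_append]
        rw [pv_rstrip_cons_of_not_pipe c _ hc, pv_rstrip_cons_of_ne_nil '|' _ hne, ihr]
      · rw [if_neg h]
        simp only [List.nil_append]
        rw [pv_rstrip_cons_of_not_pipe c _ hc, ihr]

theorem pv_wvc_congr (P Q : Int → Bool) (l : List Char) (i : Int)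
    (h : ∀ j : Int, i ≤ j → j < i + l.length - 1 → P j = Q j) :
    pvWvc P l i = pvWvc Q l i := by
  induction l generalizing i with
  | nil => rfl
  | cons c rest ih =>
    cases rest with
    | nil => rfl
    | cons d rest' =>
      have hP : P i = Q i := h i le_rfl (by simp; omega)
      simp only [pvWvc, hP]
      rw [ih (i + 1) (fun j hj1 hj2 => h j (by omega) (by simp at *; omega))]

theorem pv_wvc_false (P : Int → Bool) (l : List Char) (i : Int)
    (h : ∀ j : Int, P j = false) : pvWvc P l i = l := by
  induction l generalizing i with
  | nil => rfl
  | cons c rest ih =>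
    cases rest with
    | nil => rfl
    | cons d rest' => simp [pvWvc, h, ih]

theorem pv_wvc_split (Q : Int → Bool) (l1 : List Char) (l2 : List Char) (i : Int)
    (h1 : l1 ≠ []) (h2 : l2 ≠ [])
    (hlast : Q (i + l1.length - 1) = true)
    (hmid : ∀ j : Int, i ≤ j → j < i + l1.length - 1 → Q j = false) :
    pvWvc Q (l1 ++ l2) i = l1 ++ '|' :: pvWvc Q l2 (i + l1.length) := by
  induction l1 generalizing i with
  | nil => exact absurd rfl h1
  | cons x l1' ih =>
    cases l1' with
    | nil =>
      cases l2 with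
      | nil => exact absurd rfl h2
      | cons y l2' =>
        simp only [List.cons_append, List.nil_append, pvWvc]
        simp only [List.length_cons, List.length_nil] at hlast ⊢
        have : i + ((0 : Nat) + 1 : Nat) - 1 = i := by push_cast; omega
        rw [this] at hlast
        simp [hlast]
    | cons x' l1'' =>
      have hQ : Q i = false := by
        apply hmid i le_rfl
        simp only [List.length_cons]
        push_cast
        omega
      simp only [List.cons_append, pvWvc, hQ]
      rw [if_neg (by simp)]
      rw [List.nil_append, show x' :: (l1'' ++ l2) = (x' :: l1'') ++ l2 from rfl]
      rw [ih (i + 1) (by simp) (by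
            simp only [List.length_cons] at hlast ⊢
            convert hlast using 2
            push_cast; ring)
          (by
            intro j hj1 hj2
            apply hmid j (by omega)
            simp only [List.length_cons] at hj2 ⊢
            push_cast at hj2 ⊢; omega)]
      have : i + 1 + ((x' :: l1'').length : Int) = i + ((x :: x' :: l1'').length : Int) := by
        simp only [List.length_cons]; push_cast; ring
      rw [this]
      simp

theorem pv_bsegs_cons (ls : List Char) (prev : Int) (cuts : List Int) :
    ∃ hd tl, pvBsegs ls prev cuts = hd :: tl := by
  cases cuts <;> exact ⟨_, _, rfl⟩

theorem pv_bmain (ls : List Char) (cuts : List Int) (prev : Nat)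
    (hprev : prev ≤ ls.length)
    (hrange : ∀ c ∈ cuts, (prev : Int) < c ∧ c < (ls.length : Int))
    (hsorted : cuts.Pairwise (· < ·)) :
    PySem.Chars.join ['|'] (pvBsegs ls (prev : Int) cuts)
    = pvWvc (fun i => List.contains cuts i) (ls.drop prev) ((prev : Int) + 1) := by
  induction cuts generalizing prev with
  | nil =>
    simp only [pvBsegs]
    rw [PySem.Chars.join_singleton, PySem.List.slice_from ls (Int.natCast_nonneg prev)]
    rw [pv_wvc_false _ _ _ (fun j => by simp)]
    simp
  | cons c cs ih =>
    obtain ⟨hc1, hc2⟩ := hrange c (by simp)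
    have hc0 : 0 ≤ c := by omega
    have hcN : ((c.toNat : Nat) : Int) = c := Int.toNat_of_nonneg hc0
    have hprevc : prev < c.toNat := by
      have h' : (prev : Int) < ((c.toNat : Nat) : Int) := by rw [hcN]; exact hc1
      exact_mod_cast h'
    have hcn : c.toNat < ls.length := by
      have h' : ((c.toNat : Nat) : Int) < (ls.length : Int) := by rw [hcN]; exact hc2
      exact_mod_cast h'
    obtain ⟨hd, tl, hbs⟩ := pv_bsegs_cons ls c cs
    simp only [pvBsegs]
    rw [hbs, PySem.Chars.join_cons_cons, ← hbs]
    have hcsrange : ∀ x ∈ cs, ((c.toNat : Nat) : Int) < x ∧ x < (ls.length : Int) := by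
      intro x hx
      refine ⟨?_, (hrange x (by simp [hx])).2⟩
      rw [hcN]
      exact (List.pairwise_cons.mp hsorted).1 x hx
    rw [show pvBsegs ls c cs = pvBsegs ls ((c.toNat : Nat) : Int) cs from by rw [hcN]]
    rw [ih c.toNat (le_of_lt hcn) hcsrange (List.pairwise_cons.mp hsorted).2]
    rw [show PySem.List.slice ls (some ((prev : Nat) : Int)) (some c)
          = (ls.drop prev).take (c.toNat - prev) from by
        rw [← hcN, PySem.List.slice_natCast]
        simp
        omega]
    have hlen1 : ((ls.drop prev).take (c.toNat - prev)).length = c.toNat - prev := by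
      rw [List.length_take, List.length_drop]
      omega
    have hsplit : ls.drop prev
        = (ls.drop prev).take (c.toNat - prev) ++ ls.drop c.toNat := by
      conv_lhs => rw [← List.take_append_drop (c.toNat - prev) (ls.drop prev)]
      rw [List.drop_drop, show prev + (c.toNat - prev) = c.toNat from by omega]
    have hR : pvWvc (fun i => (c :: cs).contains i) (ls.drop prev) ((prev : Int) + 1)
        = (ls.drop prev).take (c.toNat - prev) ++ '|' ::
            pvWvc (fun i => (c :: cs).contains i) (ls.drop c.toNat)
              ((prev : Int) + 1 + (((ls.drop prev).take (c.toNat - prev)).length : Int)) := by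
      conv_lhs => rw [hsplit]
      apply pv_wvc_split
      · rw [← List.length_pos_iff, hlen1]; omega
      · rw [← List.length_pos_iff]; simp; omega
      · rw [hlen1]
        have he : (prev : Int) + 1 + ((c.toNat - prev : Nat) : Int) - 1 = c := by omega
        rw [he]
        exact List.contains_iff_mem.mpr (by simp)
      · intro j hj1 hj2
        rw [hlen1] at hj2
        have hjc : j < c := by omega
        have hjmem : j ∉ c :: cs := by
          intro hmem
          rcases List.mem_cons.mp hmem with h | h
          · omega
          · have := (List.pairwise_cons.mp hsorted).1 j h
            omega
        cases hcb : (c :: cs).contains j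
        · rfl
        · exact absurd (List.contains_iff_mem.mp hcb) hjmem
    rw [hR, hlen1]
    have hidx : (prev : Int) + 1 + ((c.toNat - prev : Nat) : Int) = ((c.toNat : Nat) : Int) + 1 := by
      omega
    rw [hidx]
    rw [pv_wvc_congr (fun i => cs.contains i) (fun i => (c :: cs).contains i)
      (ls.drop c.toNat) (((c.toNat : Nat) : Int) + 1)
      (by
        intro j hj1 hj2
        show cs.contains j = (c :: cs).contains j
        have hjc : c < j := by rw [hcN] at hj1; omega
        cases hcb : cs.contains j
        · cases hcb2 : (c :: cs).contains j
          · rfl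
          · rcases List.mem_cons.mp (List.contains_iff_mem.mp hcb2) with h | h
            · omega
            · rw [List.contains_iff_mem.mpr h] at hcb
              simp at hcb
        · exact (List.contains_iff_mem.mpr
            (List.mem_cons_of_mem _ (List.contains_iff_mem.mp hcb))).symm)]
    simp

theorem pv_bfold (ls : List Char) (cuts : List Int) (acc : List String) (prev : Int) :
    (cuts.foldl (fun (st : List String × Int) c =>
        (st.1 ++ [String.ofList (PySem.List.slice ls (some st.2) (some c))], c)) (acc, prev)).1
      ++ [String.ofList (PySem.List.slice ls
            (some ((cuts.foldl (fun (st : List String × Int) c =>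
              (st.1 ++ [String.ofList (PySem.List.slice ls (some st.2) (some c))], c)) (acc, prev)).2))
            none)]
    = acc ++ (pvBsegs ls prev cuts).map String.ofList := by
  induction cuts generalizing acc prev with
  | nil => simp [pvBsegs]
  | cons c cs ih =>
    simp only [List.foldl_cons, pvBsegs, List.map_cons]
    rw [ih]
    simp

theorem pv_contains_congr {j : Int} {l1 l2 : List Int} (h : j ∈ l1 ↔ j ∈ l2) :
    l1.contains j = l2.contains j := by
  cases h1 : l1.contains j <;> cases h2 : l2.contains j
  · rfl
  · have := h.mpr (List.contains_iff_mem.mp h2)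
    rw [List.contains_iff_mem.mpr this] at h1
    simp at h1
  · have := h.mp (List.contains_iff_mem.mp h1)
    rw [List.contains_iff_mem.mpr this] at h2
    simp at h2
  · rfl

theorem pv_lchars_not_pipe (types : List String) :
    ∀ c ∈ types.map (fun t => if t == "guru" then 'G' else 'L'), (c == '|') = false := by
  intro c hc
  obtain ⟨t, _, ht⟩ := List.mem_map.mp hc
  by_cases h : t == "guru" <;> simp [h] at ht <;> rw [← ht] <;> decide

theorem pv_map_letters (types : List String) :
    types.map (fun t => if t == "guru" then "G" else "L")
    = (types.map (fun t => if t == "guru" then 'G' else 'L')).map (fun c => String.ofList [c]) := by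
  rw [List.map_map]
  apply List.map_congr_left
  intro t _
  simp only [Function.comp_apply]
  by_cases h : (t == "guru") = true
  · rw [if_pos h, if_pos h]
  · rw [if_neg h, if_neg h]

theorem pv_letters_toList (types : List String) :
    (PySem.Str.join "" (types.map (fun t => if t == "guru" then "G" else "L"))).toList
    = types.map (fun t => if t == "guru" then 'G' else 'L') := by
  rw [PySem.Str.toList_join, pv_map_letters, List.map_map]
  have h1 : (String.toList ∘ fun c => String.ofList [c]) = fun c : Char => [c] :=
    funext fun c => String.toList_ofList
  rw [h1]
  have h2 : ("" : String).toList = [] := rfl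
  rw [h2]
  exact PySem.Chars.join_nil_singletons _

-- ===== VERDICT (by name: the statement is the Claim_ definition above) =====
theorem build_pattern_spec : Claim_equal_build_pattern := by
  intro types pada_breaks _
  unfold Spec_build_pattern
  cases pada_breaks with
  | none =>
    simp only [build_pattern, build_pattern_alt]
    rw [if_pos trivial, if_pos trivial]
  | some pb =>
    by_cases hpb : pb = []
    · subst hpb
      simp only [build_pattern, build_pattern_alt]
      have hE : (List.isEmpty ([] : List Int)) = true := rfl
      rw [if_pos hE, if_pos hE]
    · have hpb' : ¬ (pb.isEmpty = true) := by simp [hpb]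
      apply String.toList_inj.mp
      have hA : (build_pattern types (some pb)).toList
          = pvWvc (fun i => (PySem.Set.ofList pb).contains i)
              (types.map (fun t => if t == "guru" then 'G' else 'L')) 1 := by
        have hunf : build_pattern types (some pb)
            = (if pb.isEmpty then
                PySem.Str.join "" (types.map (fun t => if t == "guru" then "G" else "L"))
              else
                String.ofList (pvRstripPipes (PySem.Str.join ""
                  ((types.map (fun t => if t == "guru" then "G" else "L")).foldl
                    (fun (st : List String × Int) ch =>
                      ((if (PySem.Set.ofList pb).contains st.2 then (st.1 ++ [ch]) ++ ["|"]
                        else st.1 ++ [ch]), st.2 + 1))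
                    ([], 1)).1).toList)) := rfl
        rw [hunf, if_neg hpb']
        rw [String.toList_ofList]
        rw [pv_afold (fun i => (PySem.Set.ofList pb).contains i)]
        rw [List.nil_append, pv_map_letters]
        rw [PySem.Str.toList_join]
        have h2 : ("" : String).toList = [] := rfl
        rw [h2, pv_join_nil_flatten, pv_aweave_flatten]
        exact pv_rstrip_wv _ _ 1 (pv_lchars_not_pipe types)
      have hB : (build_pattern_alt types (some pb)).toList
          = pvWvc (fun i => (PySem.List.sorted
              (PySem.Set.ofList (pb.filter (fun p => 1 ≤ p
                && p < (((types.map (fun t => if t == "guru" then 'G' else 'L')).length : Nat) : Int))))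
              (fun x => x) false).contains i)
              (types.map (fun t => if t == "guru" then 'G' else 'L')) 1 := by
        have hunf : build_pattern_alt types (some pb)
            = (if pb.isEmpty then
                PySem.Str.join "" (types.map (fun t => if t == "guru" then "G" else "L"))
              else
                PySem.Str.join "|"
                  (((PySem.List.sorted
                      (PySem.Set.ofList (pb.filter (fun p => 1 ≤ p
                        && p < (((PySem.Str.join "" (types.map (fun t => if t == "guru" then "G" else "L"))).toList.length : Nat) : Int))))
                      (fun x => x) false).foldl
                    (fun (st : List String × Int) c =>
                      (st.1 ++ [String.ofList (PySem.List.slice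
                        (PySem.Str.join "" (types.map (fun t => if t == "guru" then "G" else "L"))).toList
                        (some st.2) (some c))], c)) ([], 0)).1
                  ++ [String.ofList (PySem.List.slice
                        (PySem.Str.join "" (types.map (fun t => if t == "guru" then "G" else "L"))).toList
                        (some (((PySem.List.sorted
                          (PySem.Set.ofList (pb.filter (fun p => 1 ≤ p
                            && p < (((PySem.Str.join "" (types.map (fun t => if t == "guru" then "G" else "L"))).toList.length : Nat) : Int))))
                          (fun x => x) false).foldl
                          (fun (st : List String × Int) c =>
                            (st.1 ++ [String.ofList (PySem.List.slice
                              (PySem.Str.join "" (types.map (fun t => if t == "guru" then "G" else "L"))).toList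
                              (some st.2) (some c))], c)) ([], 0)).2))
                        none)])) := rfl
        rw [hunf, if_neg hpb']
        rw [pv_letters_toList]
        rw [pv_bfold]
        rw [List.nil_append, PySem.Str.toList_join, List.map_map]
        have h1 : (String.toList ∘ String.ofList) = id := funext fun l => String.toList_ofList
        rw [h1, List.map_id]
        have h2 : ("|" : String).toList = ['|'] := rfl
        rw [h2]
        have hrange : ∀ c ∈ (PySem.List.sorted
              (PySem.Set.ofList (pb.filter (fun p => 1 ≤ p
                && p < (((types.map (fun t => if t == "guru" then 'G' else 'L')).length : Nat) : Int))))
              (fun x => x) false),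
            (((0 : Nat)) : Int) < c
              ∧ c < (((types.map (fun t => if t == "guru" then 'G' else 'L')).length : Nat) : Int) := by
          intro c hc
          rw [PySem.List.mem_sorted, PySem.Set.mem_ofList, List.mem_filter] at hc
          have h3 := hc.2
          simp only [Bool.and_eq_true, decide_eq_true_eq] at h3
          push_cast
          omega
        have hsorted := PySem.List.sorted_ofList_pairwise_lt
          (pb.filter (fun p => 1 ≤ p
            && p < (((types.map (fun t => if t == "guru" then 'G' else 'L')).length : Nat) : Int)))
        have hm := pv_bmain (types.map (fun t => if t == "guru" then 'G' else 'L'))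
          (PySem.List.sorted
            (PySem.Set.ofList (pb.filter (fun p => 1 ≤ p
              && p < (((types.map (fun t => if t == "guru" then 'G' else 'L')).length : Nat) : Int))))
            (fun x => x) false)
          0 (Nat.zero_le _) hrange hsorted
        simp only [Nat.cast_zero, List.drop_zero, zero_add] at hm
        rw [hm]
      rw [hA, hB]
      apply pv_wvc_congr
      intro j hj1 hj2
      apply pv_contains_congr
      rw [PySem.Set.mem_ofList, PySem.List.mem_sorted, PySem.Set.mem_ofList, List.mem_filter]
      constructor
      · intro h
        refine ⟨h, ?_⟩
        simp only [Bool.and_eq_true, decide_eq_true_eq]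
        constructor
        · omega
        · omega
      · exact fun h => h.1
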